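-- pv_equiv track=rewrite | github.com/ecardona506/Competitive-programing | Moliu Number Generator.py | solve
-- ===== SOURCE A (Python) =====
-- def solve(n):
-- 	ans = None
-- 	if n == 0:ans = 0
-- 	elif n == 3: ans = 3
-- 	else:
-- 		if n%2:
-- 			if ((n+1)>>1)%2:ans = solve(n-1) + 1
-- 			else: ans = solve(n+1) + 1
-- 		else: ans = solve(n>>1) + 1
-- 	return ans
-- ===== SOURCE B (Python) =====
-- def solve(n):
--     count = 0
--     while n != 0 and n != 3:
--         if n % 2 == 0:
--             n >>= 1
--         elif ((n + 1) >> 1) % 2: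
--             n -= 1
--         else:
--             n += 1
--         count += 1
--     return (0 if n == 0 else 3) + count
-- ===== Notes on version B (the rewrite author's own statement) =====
-- stated objective: simpler
-- what changed: Replaced the non-tail recursion 'solve(...)+1' by an iterative while loop with an explicit step counter, returning (0 or 3) + count.
import Mathlib
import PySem

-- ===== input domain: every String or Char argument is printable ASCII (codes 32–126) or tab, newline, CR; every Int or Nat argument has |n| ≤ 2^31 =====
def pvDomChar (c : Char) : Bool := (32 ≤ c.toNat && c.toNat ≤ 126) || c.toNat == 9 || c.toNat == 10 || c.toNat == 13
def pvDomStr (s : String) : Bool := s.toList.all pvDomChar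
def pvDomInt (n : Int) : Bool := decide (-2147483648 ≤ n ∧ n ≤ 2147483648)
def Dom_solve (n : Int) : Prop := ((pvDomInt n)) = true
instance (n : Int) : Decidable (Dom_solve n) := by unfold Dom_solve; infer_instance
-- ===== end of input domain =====

-- B replaces A's non-tail recursion by an iterative loop with a step counter (simpler; return value only).
-- Both ports are fuel-bounded structural recursions: the fuel pvMu n + 1 is a totality guard only,
-- strictly larger than the number of steps either Python program performs (proved via pvMu_*).

-- termination measure shared by both ports (helper, not part of either algorithm)
def pvMu (n : Int) : Nat :=
  if n % 2 ≠ 0 then (if (n + 1) / 2 % 2 ≠ 0 then n - 1 else n + 1).natAbs + 1 else n.natAbs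

-- ===== PORT A =====
def solveFuel : Nat → Int → Int
  | 0, _ => 0   -- never reached: fuel exceeds the recursion depth
  | fuel + 1, n =>
    if n = 0 then 0
    else if n = 3 then 3
    else if PySem.Int.mod n 2 ≠ 0 then
      if PySem.Int.mod (PySem.Int.floordiv (n + 1) 2) 2 ≠ 0 then solveFuel fuel (n - 1) + 1
      else solveFuel fuel (n + 1) + 1
    else solveFuel fuel (PySem.Int.floordiv n 2) + 1

def solve (n : Int) : Int := solveFuel (pvMu n + 1) n

-- ===== PORT B =====
def solveLoop : Nat → Int → Int → Int
  | 0, n, count => (if n = 0 then 0 else 3) + count   -- never reached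
  | fuel + 1, n, count =>
    if n ≠ 0 ∧ n ≠ 3 then
      solveLoop fuel
        (if PySem.Int.mod n 2 = 0 then PySem.Int.floordiv n 2
         else if PySem.Int.mod (PySem.Int.floordiv (n + 1) 2) 2 ≠ 0 then n - 1 else n + 1)
        (count + 1)
    else (if n = 0 then 0 else 3) + count

def solve_alt (n : Int) : Int := solveLoop (pvMu n + 1) n 0

-- ===== PRECONDITION & SPEC =====
def Spec_solve (n : Int) (out : Int) : Prop := out = solve_alt n
instance (n : Int) (out : Int) : Decidable (Spec_solve n out) := by unfold Spec_solve; infer_instance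

-- ===== CLAIM (what is proved, stated in full; the proofs are below) =====
def Claim_equal_solve : Prop := ∀ (n : Int), Dom_solve n → Spec_solve n (solve n)

-- ===== LEMMAS AND PROOFS =====
theorem pvMod2 (a : Int) : PySem.Int.mod a 2 = a % 2 :=
  PySem.Int.mod_eq_emod_of_pos (by norm_num)
theorem pvDiv2 (a : Int) : PySem.Int.floordiv a 2 = a / 2 :=
  PySem.Int.floordiv_eq_ediv_of_pos (by norm_num)

theorem pvMu_half (n : Int) (h0 : n ≠ 0) (he : ¬ PySem.Int.mod n 2 ≠ 0) :
    pvMu (PySem.Int.floordiv n 2) < pvMu n := by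
  simp only [pvMu, pvMod2, pvDiv2] at *
  split_ifs at * <;> omega

theorem pvMu_dec (n : Int) (ho : PySem.Int.mod n 2 ≠ 0)
    (hi : PySem.Int.mod (PySem.Int.floordiv (n + 1) 2) 2 ≠ 0) :
    pvMu (n - 1) < pvMu n := by
  simp only [pvMu, pvMod2, pvDiv2] at *
  split_ifs at * <;> omega

theorem pvMu_inc (n : Int) (ho : PySem.Int.mod n 2 ≠ 0)
    (hi : ¬ PySem.Int.mod (PySem.Int.floordiv (n + 1) 2) 2 ≠ 0) :
    pvMu (n + 1) < pvMu n := by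
  simp only [pvMu, pvMod2, pvDiv2] at *
  split_ifs at * <;> omega

theorem solveLoop_eq (fuel : Nat) : ∀ (n count : Int), pvMu n < fuel →
    solveLoop fuel n count = solveFuel fuel n + count := by
  induction fuel with
  | zero => intro n count h; omega
  | succ fuel ih =>
    intro n count h
    by_cases h0 : n = 0
    · subst h0; simp [solveLoop, solveFuel]
    · by_cases h3 : n = 3
      · subst h3; simp [solveLoop, solveFuel]
      · rw [solveLoop, if_pos ⟨h0, h3⟩, solveFuel, if_neg h0, if_neg h3]
        by_cases ho : PySem.Int.mod n 2 ≠ 0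
        · rw [if_neg ho, if_pos ho]
          by_cases hi : PySem.Int.mod (PySem.Int.floordiv (n + 1) 2) 2 ≠ 0
          · rw [if_pos hi, if_pos hi, ih _ _ (by have := pvMu_dec n ho hi; omega)]; ring
          · rw [if_neg hi, if_neg hi, ih _ _ (by have := pvMu_inc n ho hi; omega)]; ring
        · rw [if_pos (not_not.mp ho), if_neg ho,
            ih _ _ (by have := pvMu_half n h0 ho; omega)]; ring

-- ===== VERDICT (by name: the statement is the Claim_ definition above) =====
theorem solve_spec : Claim_equal_solve := by
  intro n _
  unfold Spec_solve solve_alt solve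
  rw [solveLoop_eq _ n 0 (by omega)]; ring
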